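-- pv_equiv track=rewrite | github.com/exzork/auto-reroller | umamusume.py | calculate_card_score
-- ===== SOURCE A (Python) =====
-- CARD_SCORES = {
--     "kitasan": 15,
--     "supercreek": 10,
--     "finemotion": 10
-- }
--
-- DEFAULT_CARD_SCORE = 5
--
-- def calculate_card_score(cards):
--     """Return total score and breakdown dict for a list of card names."""
--     total = 0
--     breakdown = {}
--     for card in cards:
--         score = CARD_SCORES.get(card.lower(), DEFAULT_CARD_SCORE)
--         total += score
--         breakdown[card] = breakdown.get(card, 0) + score
--     return total, breakdown
-- ===== SOURCE B (Python) =====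
-- CARD_SCORES = {
--     "kitasan": 15,
--     "supercreek": 10,
--     "finemotion": 10
-- }
--
-- DEFAULT_CARD_SCORE = 5
--
-- def calculate_card_score(cards):
--     """Return total score and breakdown dict for a list of card names."""
--     counts = {}
--     for card in cards:
--         counts[card] = counts.get(card, 0) + 1
--     breakdown = {}
--     for card, n in counts.items():
--         breakdown[card] = n * CARD_SCORES.get(card.lower(), DEFAULT_CARD_SCORE)
--     return sum(breakdown.values()), breakdown
-- ===== Notes on version B (the rewrite author's own statement) =====
-- stated objective: alternative
-- what changed: Replaces A's single incremental accumulation loop (adding each card's score into total and breakdown per occurrence) with a two-phase count-then-multiply structure: tally occurrences into a count dict, then compute each distinct card's breakdown entry as count*unit_score and total as the sum of the breakdown values.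
import Mathlib
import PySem

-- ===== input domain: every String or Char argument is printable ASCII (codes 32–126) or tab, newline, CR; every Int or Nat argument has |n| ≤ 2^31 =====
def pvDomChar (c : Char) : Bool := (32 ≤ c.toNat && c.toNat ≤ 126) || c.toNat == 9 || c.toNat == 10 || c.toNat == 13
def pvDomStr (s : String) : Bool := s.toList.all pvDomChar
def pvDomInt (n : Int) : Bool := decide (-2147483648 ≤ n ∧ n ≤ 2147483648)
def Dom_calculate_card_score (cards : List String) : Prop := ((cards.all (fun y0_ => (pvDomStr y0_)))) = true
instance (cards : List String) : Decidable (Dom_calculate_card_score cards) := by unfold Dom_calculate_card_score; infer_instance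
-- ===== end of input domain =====

-- B replaces A's single incremental accumulation loop by a count-then-multiply two-phase structure (same O(n) cost, different decomposition).


-- ===== PORT A =====
def CARD_SCORES : PySem.Dict String Int :=
  PySem.Dict.ofList [("kitasan", 15), ("supercreek", 10), ("finemotion", 10)]

def DEFAULT_CARD_SCORE : Int := 5

-- A: one incremental loop, accumulating total and breakdown together.
def calculate_card_score (cards : List String) : Int × (List (String × Int)) :=
  let st := cards.foldl (fun st card =>
    let score := CARD_SCORES.getD (PySem.Str.lower card) DEFAULT_CARD_SCORE
    (st.1 + score, st.2.insert card (st.2.getD card 0 + score)))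
    ((0 : Int), (PySem.Dict.empty : PySem.Dict String Int))
  (st.1, st.2.items)

-- ===== PORT B =====
-- B: count occurrences first, then one multiplication per distinct card.
def calculate_card_score_alt (cards : List String) : Int × (List (String × Int)) :=
  let counts : PySem.Dict String Int :=
    cards.foldl (fun d card => d.insert card (d.getD card 0 + 1)) PySem.Dict.empty
  let breakdown : PySem.Dict String Int :=
    counts.items.foldl (fun d p =>
      d.insert p.1 (p.2 * CARD_SCORES.getD (PySem.Str.lower p.1) DEFAULT_CARD_SCORE))
      PySem.Dict.empty
  (breakdown.values.sum, breakdown.items)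

-- ===== PRECONDITION & SPEC =====
def Spec_calculate_card_score (cards : List String) (out : Int × (List (String × Int))) : Prop := out = calculate_card_score_alt cards
instance (cards : List String) (out : Int × (List (String × Int))) : Decidable (Spec_calculate_card_score cards out) := by unfold Spec_calculate_card_score; infer_instance

-- ===== CLAIM (what is proved, stated in full; the proofs are below) =====
def Claim_equal_calculate_card_score : Prop := ∀ (cards : List String), Dom_calculate_card_score cards → Spec_calculate_card_score cards (calculate_card_score cards)

-- ===== LEMMAS AND PROOFS =====

-- unit score of a card (proof-side abbreviation)
def pvUnit (c : String) : Int := CARD_SCORES.getD (PySem.Str.lower c) DEFAULT_CARD_SCORE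

-- helper: sum of an ite-singleton over a nodup list containing x
lemma pv_sum_ite_single (S : List String) (x : String) (f : String → Int)
    (hn : S.Nodup) (hx : x ∈ S) :
    (S.map (fun k => if k = x then f k else 0)).sum = f x := by
  induction S with
  | nil => cases hx
  | cons a S ih =>
    simp only [List.map_cons, List.sum_cons]
    rcases List.mem_cons.mp hx with rfl | h
    · have hxS : x ∉ S := (List.nodup_cons.mp hn).1
      have h0 : ∀ k ∈ S, (if k = x then f k else 0) = 0 := by
        intro k hk
        have : k ≠ x := fun e => hxS (e ▸ hk)
        simp [this]
      rw [if_pos rfl, List.map_congr_left h0]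
      simp
    · have hax : a ≠ x := fun e => (List.nodup_cons.mp hn).1 (e ▸ h)
      rw [if_neg hax, ih (List.nodup_cons.mp hn).2 h]
      ring

lemma pv_set_add_mem (s : PySem.Set String) (x : String) (h : x ∈ s) :
    PySem.Set.add s x = s := by
  simp [PySem.Set.add, PySem.Set.contains, h]

lemma pv_set_add_not_mem (s : PySem.Set String) (x : String) (h : ¬ x ∈ s) :
    PySem.Set.add s x = s ++ [x] := by
  simp [PySem.Set.add, PySem.Set.contains, h]

lemma pv_sum_weighted (xs : List String) (f : String → Int) :
    ((PySem.Set.ofList xs).map (fun k => (xs.count k : Int) * f k)).sum = (xs.map f).sum := by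
  induction xs using List.reverseRecOn with
  | nil => simp [PySem.Set.ofList]
  | append_singleton xs x ih =>
    have hofl : PySem.Set.ofList (xs ++ [x]) = PySem.Set.add (PySem.Set.ofList xs) x := by
      simp [PySem.Set.ofList_eq_foldl, List.foldl_append]
    have hcnt : ∀ k, ((xs ++ [x]).count k : Int) = (xs.count k : Int) + (if k = x then 1 else 0) := by
      intro k
      rcases eq_or_ne k x with rfl | h
      · simp [List.count_append]
      · simp [List.count_append, h, Ne.symm h]
    by_cases hx : x ∈ xs
    · have hmem : x ∈ PySem.Set.ofList xs := (PySem.Set.mem_ofList xs x).mpr hx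
      rw [hofl, pv_set_add_mem _ _ hmem]
      have : ∀ k ∈ PySem.Set.ofList xs,
          ((xs ++ [x]).count k : Int) * f k
            = (xs.count k : Int) * f k + (if k = x then f k else 0) := by
        intro k _
        rw [hcnt k]; rcases eq_or_ne k x with rfl | h
        · simp; ring
        · simp [h]
      rw [List.map_congr_left this]
      rw [PySem.List.sum_map_add_int]
      rw [ih, pv_sum_ite_single _ x f (PySem.Set.nodup_ofList xs) hmem]
      simp [List.map_append]
    · have hmem : ¬ x ∈ PySem.Set.ofList xs := fun h => hx ((PySem.Set.mem_ofList xs x).mp h)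
      rw [hofl, pv_set_add_not_mem _ _ hmem]
      rw [List.map_append, List.sum_append]
      have h1 : ∀ k ∈ PySem.Set.ofList xs,
          ((xs ++ [x]).count k : Int) * f k = (xs.count k : Int) * f k := by
        intro k hk
        have : k ≠ x := fun e => hmem (e ▸ hk)
        rw [hcnt k]; simp [this]
      rw [List.map_congr_left h1, ih]
      simp only [List.map_cons, List.map_nil, List.sum_cons, List.sum_nil]
      rw [List.count_append, List.count_eq_zero_of_not_mem hx]
      simp [List.map_append]

-- A's combined fold splits into the running total and the breakdown dict
lemma pv_afold (cards : List String) (t : Int) (d : PySem.Dict String Int) :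
    cards.foldl (fun st card =>
        (st.1 + pvUnit card, st.2.insert card (st.2.getD card 0 + pvUnit card))) (t, d)
      = (t + (cards.map pvUnit).sum,
         cards.foldl (fun d card => d.insert card (d.getD card 0 + pvUnit card)) d) := by
  induction cards generalizing t d with
  | nil => simp
  | cons c cs ih => simp [ih, List.sum_cons]; ring

lemma pv_gfold_getD (cards : List String) (d : PySem.Dict String Int) (k : String) :
    (cards.foldl (fun d card => d.insert card (d.getD card 0 + pvUnit card)) d).getD k 0
      = d.getD k 0 + (cards.count k : Int) * pvUnit k := by
  induction cards generalizing d with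
  | nil => simp
  | cons c cs ih =>
    simp only [List.foldl_cons, ih, PySem.Dict.getD_insert]
    rcases eq_or_ne k c with rfl | h
    · simp [List.count_cons_self]; ring
    · rw [if_neg h]; simp [List.count_cons]; exact Or.inl (fun e => h e.symm)

lemma pv_breakdownA (cards : List String) :
    (cards.foldl (fun d card => d.insert card (d.getD card 0 + pvUnit card))
        (PySem.Dict.empty : PySem.Dict String Int)).items
      = (PySem.Set.ofList cards).map (fun k => (k, (cards.count k : Int) * pvUnit k)) := by
  have hnd : (cards.foldl (fun d card => d.insert card (d.getD card 0 + pvUnit card))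
      (PySem.Dict.empty : PySem.Dict String Int)).keys.Nodup :=
    PySem.Dict.nodup_keys_foldl_insert cards _ _ PySem.Dict.nodup_keys_empty
  have hkeys : (cards.foldl (fun d card => d.insert card (d.getD card 0 + pvUnit card))
      (PySem.Dict.empty : PySem.Dict String Int)).keys = PySem.Set.ofList cards := by
    rw [PySem.Dict.keys_foldl_insert]
    simp [PySem.Dict.keys_empty, PySem.Set.ofList_eq_foldl, PySem.Set.update]
  rw [PySem.Dict.items_eq_map_keys _ hnd 0, hkeys]
  exact List.map_congr_left (fun k _ => by rw [pv_gfold_getD]; simp)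

lemma pv_breakdownB (cards : List String) :
    ((cards.foldl (fun d card => d.insert card (d.getD card 0 + 1))
        (PySem.Dict.empty : PySem.Dict String Int)).items.foldl
      (fun d p => d.insert p.1 (p.2 * CARD_SCORES.getD (PySem.Str.lower p.1) DEFAULT_CARD_SCORE))
      (PySem.Dict.empty : PySem.Dict String Int)).items
      = (PySem.Set.ofList cards).map (fun k => (k, (cards.count k : Int) * pvUnit k)) := by
  rw [PySem.Dict.foldl_insert_getD_add_one_eq_counter, PySem.Dict.items_counter]
  have hfresh := PySem.Dict.items_foldl_insert_fresh
      ((PySem.Set.ofList cards).map (fun k => (k, (cards.count k : Int))))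
      (fun p => p.1)
      (fun p => p.2 * CARD_SCORES.getD (PySem.Str.lower p.1) DEFAULT_CARD_SCORE)
      PySem.Dict.empty
      (fun a _ => PySem.Dict.contains_empty _)
      (by simp only [List.map_map, Function.comp_def]
          simp)
  rw [hfresh]
  simp [List.map_map, Function.comp_def, pvUnit, PySem.Dict.empty]


-- ===== VERDICT (by name: the statement is the Claim_ definition above) =====
theorem calculate_card_score_spec : Claim_equal_calculate_card_score := by
  intro cards _
  unfold Spec_calculate_card_score
  have hA : calculate_card_score cards
      = ((cards.map pvUnit).sum,
         (PySem.Set.ofList cards).map (fun k => (k, (cards.count k : Int) * pvUnit k))) := by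
    show ((cards.foldl (fun st card =>
            (st.1 + pvUnit card, st.2.insert card (st.2.getD card 0 + pvUnit card)))
            ((0 : Int), (PySem.Dict.empty : PySem.Dict String Int))).1,
          (cards.foldl (fun st card =>
            (st.1 + pvUnit card, st.2.insert card (st.2.getD card 0 + pvUnit card)))
            ((0 : Int), (PySem.Dict.empty : PySem.Dict String Int))).2.items) = _
    rw [pv_afold, pv_breakdownA]
    simp
  have hB : calculate_card_score_alt cards
      = ((((PySem.Set.ofList cards).map (fun k => (k, (cards.count k : Int) * pvUnit k))).map
            (fun p => p.2)).sum,
         (PySem.Set.ofList cards).map (fun k => (k, (cards.count k : Int) * pvUnit k))) := by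
    show (((cards.foldl (fun d card => d.insert card (d.getD card 0 + 1))
            (PySem.Dict.empty : PySem.Dict String Int)).items.foldl
            (fun d p => d.insert p.1 (p.2 * CARD_SCORES.getD (PySem.Str.lower p.1) DEFAULT_CARD_SCORE))
            (PySem.Dict.empty : PySem.Dict String Int)).items.map (fun p => p.2) |>.sum,
          ((cards.foldl (fun d card => d.insert card (d.getD card 0 + 1))
            (PySem.Dict.empty : PySem.Dict String Int)).items.foldl
            (fun d p => d.insert p.1 (p.2 * CARD_SCORES.getD (PySem.Str.lower p.1) DEFAULT_CARD_SCORE))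
            (PySem.Dict.empty : PySem.Dict String Int)).items) = _
    rw [pv_breakdownB]
  rw [hA, hB]
  rw [List.map_map]
  have := pv_sum_weighted cards pvUnit
  simp only [Function.comp_def] at *
  rw [this]
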